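-- pv_equiv track=rewrite | github.com/posl/comment_recommendation | script/split_gen/5_time/en/282_C/7.py | replace_comma
-- ===== SOURCE A (Python) =====
-- def replace_comma(S):
--     S = list(S)
--     K = S.count('"') // 2
--     for i in range(1, K + 1):
--         start = S.index('"')
--         end = S.index('"', start + 1)
--         for j in range(start, end + 1):
--             if S[j] == ',':
--                 S[j] = '.'
--     return "".join(S)
-- ===== SOURCE B (Python) =====
-- def replace_comma(S):
--     start = S.find('"')
--     if start == -1:
--         return S
--     end = S.find('"', start + 1)
--     if end == -1:
--         return S
--     mid = ''.join('.' if c == ',' else c for c in S[start:end + 1])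
--     return S[:start] + mid + S[end + 1:]
-- ===== Notes on version B (the rewrite author's own statement) =====
-- stated objective: simpler
-- what changed: B drops A's char-list mutation and its K-times repeated scanning loop: it locates the first two quotes once with find, and rebuilds the string as prefix + comma-to-dot-mapped quoted segment + suffix.
import Mathlib
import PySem

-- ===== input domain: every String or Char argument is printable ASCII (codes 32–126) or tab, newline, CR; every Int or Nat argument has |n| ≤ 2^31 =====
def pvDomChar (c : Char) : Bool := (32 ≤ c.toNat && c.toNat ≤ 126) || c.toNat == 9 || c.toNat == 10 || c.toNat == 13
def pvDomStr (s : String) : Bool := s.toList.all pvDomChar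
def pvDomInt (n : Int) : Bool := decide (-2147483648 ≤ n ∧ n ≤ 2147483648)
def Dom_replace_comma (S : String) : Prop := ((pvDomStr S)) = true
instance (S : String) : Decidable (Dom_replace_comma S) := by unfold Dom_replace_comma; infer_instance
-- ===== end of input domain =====

-- B replaces A's K-times scanning loop over a mutable char list by one find/find-from and a single
-- slice rebuild that maps ',' to '.' inside the first quoted region (objective: simpler).

-- ===== PORT A =====
-- A-side helpers: the body of A's outer loop and of its inner write loop, as in the Python.
def pvStep (cs : List Char) (j : Int) : List Char :=
  if PySem.List.pyGetD cs j ' ' = ',' then PySem.List.pySetD cs j '.' else cs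

def pvBody (cs : List Char) : List Char :=
  match PySem.List.index? cs '"' with
  | none => cs        -- unreachable inside the loop (K ≥ 1 ⇒ '"' ∈ cs; Python would raise ValueError)
  | some start =>
    -- S.index('"', start + 1): first index ≥ start+1 holding '"'
    match (PySem.List.index? (cs.drop (start + 1)) '"').map (· + (start + 1)) with
    | none => cs      -- unreachable likewise
    | some stop =>
      (PySem.List.pyRange (start : Int) ((stop : Int) + 1) 1).foldl pvStep cs

def replace_comma (S : String) : String :=
  let cs := S.toList
  let K : Int := PySem.Int.floordiv ((PySem.List.count cs '"' : Nat) : Int) 2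
  String.ofList ((PySem.List.pyRange 1 (K + 1) 1).foldl (fun cs _ => pvBody cs) cs)

-- ===== PORT B =====
def replace_comma_alt (S : String) : String :=
  let cs := S.toList
  let start := PySem.Chars.find cs ['"']
  if start = -1 then S
  else
    let stop := PySem.Chars.findFrom cs ['"'] (start + 1) none
    if stop = -1 then S
    else
      String.ofList (PySem.List.slice cs none (some start)
        ++ (PySem.List.slice cs (some start) (some (stop + 1))).map
             (fun c => if c = ',' then '.' else c)
        ++ PySem.List.slice cs (some (stop + 1)) none)

-- ===== PRECONDITION & SPEC =====
def Spec_replace_comma (S : String) (out : String) : Prop := out = replace_comma_alt S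
instance (S : String) (out : String) : Decidable (Spec_replace_comma S out) := by unfold Spec_replace_comma; infer_instance

-- ===== CLAIM (what is proved, stated in full; the proofs are below) =====
def Claim_equal_replace_comma : Prop := ∀ (S : String), Dom_replace_comma S → Spec_replace_comma S (replace_comma S)

-- ===== LEMMAS AND PROOFS =====

/-- ',' ↦ '.', everything else unchanged (the transformation both programs apply in the quoted region). -/
def pvR (c : Char) : Char := if c = ',' then '.' else c

theorem pvR_quote : pvR '"' = '"' := by decide

theorem pvR_idem (c : Char) : pvR (pvR c) = pvR c := by
  unfold pvR; split_ifs with h1 h2 <;> simp_all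

theorem pvR_eq_quote_iff (c : Char) : pvR c = '"' ↔ c = '"' := by
  unfold pvR; split_ifs with h <;> simp_all

theorem pvStep_eq (cs : List Char) (j : Nat) (h : j < cs.length) :
    pvStep cs (j : Int) = cs.set j (pvR cs[j]) := by
  unfold pvStep pvR
  rw [PySem.List.pyGetD_eq_getElem _ _ (by omega) (by exact_mod_cast h),
      PySem.List.pySetD_of_nonneg _ _ (by omega)]
  simp only [Int.toNat_natCast]
  split_ifs with hc <;> simp

/-- A's inner loop over range(a, a+n) maps pvR over the segment [a, a+n). -/
theorem foldl_pvStep_seg (n : Nat) : ∀ (a : Nat) (cs : List Char), a + n ≤ cs.length →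
    (PySem.List.pyRange (a : Int) ((a : Int) + (n : Int)) 1).foldl pvStep cs
      = cs.take a ++ ((cs.drop a).take n).map pvR ++ cs.drop (a + n) := by
  induction n with
  | zero => intro a cs _; simp
  | succ n ih =>
    intro a cs h
    have ha : a < cs.length := by omega
    rw [PySem.List.pyRange_one_cons (by omega)]
    have h1 : ((a : Int) + 1) = ((a + 1 : Nat) : Int) := by push_cast; ring
    have h2 : ((a : Int) + ((n + 1 : Nat) : Int)) = ((a + 1 : Nat) : Int) + (n : Int) := by
      push_cast; ring
    rw [List.foldl_cons, h1, h2, pvStep_eq cs a ha,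
        ih (a + 1) (cs.set a (pvR cs[a])) (by simp; omega)]
    rw [List.set_eq_take_append_cons_drop, if_pos ha]
    have hta : (cs.take a).length = a := by simp; omega
    conv_rhs => rw [List.drop_eq_getElem_cons ha]
    have d1 : List.drop (a + 1) (cs.take a) = [] := List.drop_eq_nil_of_le (by rw [hta]; omega)
    have d2 : List.drop (a + 1 + n) (cs.take a) = [] := List.drop_eq_nil_of_le (by rw [hta]; omega)
    rw [List.take_append, List.drop_append, List.drop_append, hta, List.take_take, d1, d2]
    have e1 : a + 1 - a = 1 := by omega
    have e2 : a + 1 + n - a = n + 1 := by omega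
    have e3 : min (a + 1) a = a := by omega
    rw [e1, e2, e3]
    simp [List.drop_drop]
    rw [show a + (n + 1) = a + 1 + n from by omega]
    conv_rhs => rw [List.drop_eq_getElem_cons (by simpa using ha), List.take_succ_cons]
    simp

/-- A fold with a body that ignores the index fixes any fixpoint. -/
theorem foldl_fix {α β : Type} (g : α → β → α) (s : α) (hs : ∀ b, g s b = s) :
    ∀ (l : List β), l.foldl g s = s := by
  intro l; induction l with
  | nil => rfl
  | cons x xs ih => rw [List.foldl_cons, hs x, ih]

theorem singleton_infix_iff (c : Char) (l : List Char) : [c] <:+: l ↔ c ∈ l := by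
  constructor
  · rintro ⟨s, t, rfl⟩; simp
  · intro h
    obtain ⟨s, t, rfl⟩ := List.append_of_mem h
    exact ⟨s, t, by simp⟩

/-- Split a list at the first occurrence of c. -/
theorem first_split {c : Char} {l : List Char} (h : c ∈ l) :
    ∃ p t, l = p ++ c :: t ∧ c ∉ p := by
  induction l with
  | nil => simp at h
  | cons x xs ih =>
    by_cases hx : x = c
    · exact ⟨[], xs, by simp [hx], by simp⟩
    · obtain ⟨p, t, rfl, hp⟩ := ih (by simp at h; tauto)
      exact ⟨x :: p, t, by simp, by simp [hp, Ne.symm, hx]⟩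

/-- Every char list has no quote, exactly one quote, or a first pair of quotes. -/
theorem quote_trichotomy (l : List Char) :
    '"' ∉ l ∨ (∃ p t, l = p ++ '"' :: t ∧ '"' ∉ p ∧ '"' ∉ t)
      ∨ (∃ p m t, l = p ++ '"' :: m ++ '"' :: t ∧ '"' ∉ p ∧ '"' ∉ m) := by
  by_cases h : '"' ∈ l
  · obtain ⟨p, t, rfl, hp⟩ := first_split h
    by_cases ht : '"' ∈ t
    · obtain ⟨m, t', rfl, hm⟩ := first_split ht
      exact Or.inr (Or.inr ⟨p, m, t', by simp, hp, hm⟩)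
    · exact Or.inr (Or.inl ⟨p, t, rfl, hp, ht⟩)
  · exact Or.inl h

theorem find_first (p t : List Char) (hp : '"' ∉ p) :
    PySem.Chars.find (p ++ '"' :: t) ['"'] = (p.length : Int) := by
  set cs := p ++ '"' :: t with hcs
  have hinf : ['"'] <:+: cs := ⟨p, t, by rw [hcs]; simp⟩
  have hne : PySem.Chars.find cs ['"'] ≠ -1 := by
    rw [Ne, PySem.Chars.find_eq_neg_one_iff]; exact not_not_intro hinf
  have h0 : 0 ≤ PySem.Chars.find cs ['"'] := (PySem.Chars.find_nonneg_iff cs ['"']).mpr hinf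
  have hspec := PySem.Chars.findFrom_natCast_spec cs ['"'] 0 (Nat.zero_le _)
    (by rw [Nat.cast_zero, PySem.Chars.findFrom_zero]; exact hne)
  rw [Nat.cast_zero, PySem.Chars.findFrom_zero] at hspec
  obtain ⟨-, hpre, hmin⟩ := hspec
  set f := (PySem.Chars.find cs ['"']).toNat with hf
  have hle : f ≤ p.length := by
    by_contra hlt
    exact hmin p.length (Nat.zero_le _) (by omega)
      ⟨t, by rw [hcs, List.drop_left]; rfl⟩
  have hge : ¬ (f < p.length) := by
    intro hlt
    obtain ⟨r, hr⟩ := hpre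
    have hdrop : List.drop f cs = p.drop f ++ '"' :: t := by
      rw [hcs, List.drop_append, Nat.sub_eq_zero_of_le (le_of_lt hlt), List.drop_zero]
    rw [hdrop] at hr
    have hnn : p.drop f ≠ [] := by simp; omega
    obtain ⟨x, xs, hx⟩ := List.exists_cons_of_ne_nil hnn
    rw [hx] at hr
    have hx' : x = '"' := by simpa using congrArg List.head? hr.symm
    have hxp : x ∈ p := by
      have : x ∈ List.drop f p := by rw [hx]; exact List.mem_cons_self
      exact List.drop_subset f p this
    exact hp (hx' ▸ hxp)
  have : f = p.length := by omega
  rw [← Int.toNat_of_nonneg h0, ← hf, this]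

/-- index? at the first quote. -/
theorem index?_first (p t : List Char) (hp : '"' ∉ p) :
    PySem.List.index? (p ++ '"' :: t) '"' = some p.length := by
  rw [PySem.List.index?_eq_some_iff]
  exact ⟨p, t, rfl, rfl, hp⟩

/-- A's outer-loop body rewrites the first quoted region. -/
theorem pvBody_eval (p m t : List Char) (hp : '"' ∉ p) (hm : '"' ∉ m) :
    pvBody (p ++ '"' :: (m ++ '"' :: t)) = p ++ '"' :: (m.map pvR ++ '"' :: t) := by
  have hdrop : (p ++ '"' :: (m ++ '"' :: t)).drop (p.length + 1) = m ++ '"' :: t := by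
    rw [show p ++ '"' :: (m ++ '"' :: t) = (p ++ ['"']) ++ (m ++ '"' :: t) from by simp,
        show p.length + 1 = (p ++ ['"']).length from by simp, List.drop_left]
  unfold pvBody
  rw [index?_first p (m ++ '"' :: t) hp]
  dsimp only
  rw [hdrop, index?_first m t hm]
  simp only [Option.map_some]
  have hb : ((m.length + (p.length + 1) : Nat) : Int) + 1
      = ((p.length : Nat) : Int) + ((m.length + 2 : Nat) : Int) := by push_cast; ring
  rw [hb, foldl_pvStep_seg (m.length + 2) p.length _ (by simp)]
  rw [List.take_left' rfl]
  have hd : (p ++ '"' :: (m ++ '"' :: t)).drop p.length = '"' :: (m ++ '"' :: t) :=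
    List.drop_left' rfl
  rw [hd]
  have hd2 : (p ++ '"' :: (m ++ '"' :: t)).drop (p.length + (m.length + 2)) = t := by
    rw [show p ++ '"' :: (m ++ '"' :: t) = (p ++ '"' :: (m ++ ['"'])) ++ t from by simp,
        show p.length + (m.length + 2) = (p ++ '"' :: (m ++ ['"'])).length from by simp,
        List.drop_left]
  rw [hd2]
  have ht : ('"' :: (m ++ '"' :: t)).take (m.length + 2) = '"' :: (m ++ ['"']) := by
    rw [show ('"' :: (m ++ '"' :: t)) = ('"' :: (m ++ ['"'])) ++ t from by simp,
        show m.length + 2 = ('"' :: (m ++ ['"'])).length from by simp, List.take_left]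
  rw [ht]
  simp [pvR_quote]

theorem portA_two (S : String) (p m t : List Char) (hS : S.toList = p ++ '"' :: m ++ '"' :: t)
    (hp : '"' ∉ p) (hm : '"' ∉ m) :
    replace_comma S = String.ofList (p ++ '"' :: m.map pvR ++ '"' :: t) := by
  have hS' : S.toList = p ++ '"' :: (m ++ '"' :: t) := by rw [hS]; simp
  have hmp : '"' ∉ m.map pvR := by
    intro hmem
    obtain ⟨c, hc, hcq⟩ := List.mem_map.mp hmem
    exact hm ((pvR_eq_quote_iff c).mp hcq ▸ hc)
  have hfix : pvBody (p ++ '"' :: (m.map pvR ++ '"' :: t)) = p ++ '"' :: (m.map pvR ++ '"' :: t) := by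
    rw [pvBody_eval p (m.map pvR) t hp hmp]
    congr 3
    rw [List.map_map]
    exact List.map_congr_left (fun c _ => pvR_idem c)
  have hcnt : PySem.List.count (p ++ '"' :: (m ++ '"' :: t)) '"' = t.count '"' + 2 := by
    rw [PySem.List.count_eq]
    simp [List.count_append, List.count_eq_zero.mpr hp, List.count_eq_zero.mpr hm]
  unfold replace_comma
  simp only [hS', hcnt]
  have hfd : PySem.Int.floordiv ((t.count '"' + 2 : Nat) : Int) 2
      = (((t.count '"' + 2) / 2 : Nat) : Int) := by
    exact_mod_cast PySem.Int.floordiv_natCast (t.count '"' + 2) 2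
  have hq : 1 ≤ (t.count '"' + 2) / 2 := by omega
  rw [hfd, PySem.List.pyRange_one_cons (by push_cast; omega), List.foldl_cons]
  rw [pvBody_eval p m t hp hm, foldl_fix _ _ (fun _ => hfix)]
  congr 1
  simp

theorem portB_two (S : String) (p m t : List Char) (hS : S.toList = p ++ '"' :: m ++ '"' :: t)
    (hp : '"' ∉ p) (hm : '"' ∉ m) :
    replace_comma_alt S = String.ofList (p ++ '"' :: m.map pvR ++ '"' :: t) := by
  have hS' : S.toList = p ++ '"' :: (m ++ '"' :: t) := by rw [hS]; simp
  have hfind : PySem.Chars.find S.toList ['"'] = (p.length : Int) := by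
    rw [hS']; exact find_first p (m ++ '"' :: t) hp
  have hdrop : S.toList.drop (p.length + 1) = m ++ '"' :: t := by
    rw [hS', show p ++ '"' :: (m ++ '"' :: t) = (p ++ ['"']) ++ (m ++ '"' :: t) from by simp,
        show p.length + 1 = (p ++ ['"']).length from by simp, List.drop_left]
  have hlen : p.length + 1 ≤ S.toList.length := by simp [hS']
  have hff : PySem.Chars.findFrom S.toList ['"'] ((p.length : Int) + 1) none
      = ((p.length + 1 + m.length : Nat) : Int) := by
    rw [show ((p.length : Int) + 1) = ((p.length + 1 : Nat) : Int) from by push_cast; ring,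
        PySem.Chars.findFrom_natCast _ _ _ hlen, hdrop, find_first m t hm,
        if_neg (by omega)]
    push_cast; ring
  unfold replace_comma_alt
  simp only [hfind, hff]
  rw [if_neg (by omega), if_neg (by omega)]
  rw [show ((p.length + 1 + m.length : Nat) : Int) + 1 = ((p.length + m.length + 2 : Nat) : Int)
        from by push_cast; ring]
  rw [PySem.List.slice_to_natCast, PySem.List.slice_natCast, PySem.List.slice_from_natCast]
  rw [show (fun c => if c = ',' then '.' else c) = pvR from rfl]
  rw [hS']
  rw [List.take_left' rfl, List.drop_left' rfl]
  have hd2 : (p ++ '"' :: (m ++ '"' :: t)).drop (p.length + m.length + 2) = t := by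
    rw [show p ++ '"' :: (m ++ '"' :: t) = (p ++ '"' :: (m ++ ['"'])) ++ t from by simp,
        show p.length + m.length + 2 = (p ++ '"' :: (m ++ ['"'])).length from by simp; omega,
        List.drop_left]
  have ht : ('"' :: (m ++ '"' :: t)).take (p.length + m.length + 2 - p.length) = '"' :: (m ++ ['"']) := by
    rw [show p.length + m.length + 2 - p.length = m.length + 2 from by omega,
        show ('"' :: (m ++ '"' :: t)) = ('"' :: (m ++ ['"'])) ++ t from by simp,
        show m.length + 2 = ('"' :: (m ++ ['"'])).length from by simp, List.take_left]
  rw [hd2, ht]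
  congr 1
  simp [pvR_quote]

theorem portA_small (S : String) (h : S.toList.count '"' ≤ 1) : replace_comma S = S := by
  have hcast : PySem.Int.floordiv ((PySem.List.count S.toList '"' : Nat) : Int) 2
      = ((PySem.List.count S.toList '"' / 2 : Nat) : Int) := by
    exact_mod_cast PySem.Int.floordiv_natCast (PySem.List.count S.toList '"') 2
  have hdiv : PySem.List.count S.toList '"' / 2 = 0 := by
    rw [PySem.List.count_eq]
    omega
  unfold replace_comma
  simp only [hcast, hdiv]
  norm_num

theorem portB_none (S : String) (h : '"' ∉ S.toList) : replace_comma_alt S = S := by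
  unfold replace_comma_alt
  have : PySem.Chars.find S.toList ['"'] = -1 := by
    rw [PySem.Chars.find_eq_neg_one_iff, singleton_infix_iff]; exact h
  simp [this]

theorem portB_one (S : String) (p t : List Char) (hS : S.toList = p ++ '"' :: t)
    (hp : '"' ∉ p) (ht : '"' ∉ t) : replace_comma_alt S = S := by
  have hfind : PySem.Chars.find S.toList ['"'] = (p.length : Int) := by
    rw [hS]; exact find_first p t hp
  have hdrop : S.toList.drop (p.length + 1) = t := by
    rw [hS, show p ++ '"' :: t = (p ++ ['"']) ++ t from by simp,
        show p.length + 1 = (p ++ ['"']).length from by simp, List.drop_left]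
  have hlen : p.length + 1 ≤ S.toList.length := by simp [hS]
  have hff : PySem.Chars.findFrom S.toList ['"'] ((p.length : Int) + 1) none = -1 := by
    rw [show ((p.length : Int) + 1) = ((p.length + 1 : Nat) : Int) from by push_cast; ring]
    rw [PySem.Chars.findFrom_natCast_eq_neg_one_iff _ _ _ hlen, hdrop, singleton_infix_iff]
    exact ht
  unfold replace_comma_alt
  simp [hfind, hff]

-- ===== VERDICT (by name: the statement is the Claim_ definition above) =====
theorem replace_comma_spec : Claim_equal_replace_comma := by
  intro S _
  unfold Spec_replace_comma
  rcases quote_trichotomy S.toList with h | ⟨p, t, hS, hp, ht⟩ | ⟨p, m, t, hS, hp, hm⟩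
  · rw [portB_none S h, portA_small S (by have := List.count_eq_zero.mpr h; omega)]
  · rw [portB_one S p t hS hp ht, portA_small S (by
      have h1 := List.count_eq_zero.mpr hp
      have h2 := List.count_eq_zero.mpr ht
      rw [hS]
      simp [List.count_append]
      omega)]
  · rw [portA_two S p m t hS hp hm, portB_two S p m t hS hp hm]
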